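-- pv_equiv track=rewrite | github.com/EdwardNgo/Algorithm-application | contest1/sms.py | getPressNum
-- ===== SOURCE A (Python) =====
-- letterMap = {'a':1, 'b':2, 'c':3,'d':1,'e':2, 'f':3,'g':1, 'h':2, 'i':3,'j':1,'k':2,'l':3,'m':1,'n':2,'o':3,'p':1,'q':2,'r':3,'s':4,'t':1,'u':2,'v':3,'w':1,'x':2,'y':3,'z':'4',' ':1}
--
-- def getPressNum(msg):
--     # letters = list(msg)
--     total = 0
--     for letter in msg:
--         try:
--             total += letterMap[letter]
--         except:
--             continue
--     return total
-- ===== SOURCE B (Python) =====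
-- letterMap = {'a':1, 'b':2, 'c':3,'d':1,'e':2, 'f':3,'g':1, 'h':2, 'i':3,'j':1,'k':2,'l':3,'m':1,'n':2,'o':3,'p':1,'q':2,'r':3,'s':4,'t':1,'u':2,'v':3,'w':1,'x':2,'y':3,'z':'4',' ':1}
--
-- def getPressNum(msg):
--     # Iterate over the fixed keypad table instead of the message:
--     # each mapped key contributes value * (occurrences in msg).
--     # 'z' maps to the string '4'; '4' * count is a str, so 'total += ...'
--     # raises TypeError, swallowed just like A's bare except -> contributes 0.
--     total = 0
--     for ch, v in letterMap.items():
--         try: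
--             total += v * msg.count(ch)
--         except TypeError:
--             continue
--     return total
-- ===== Notes on version B (the rewrite author's own statement) =====
-- stated objective: faster
-- what changed: B inverts the loop: instead of A's per-character walk over the message with a dict lookup per character, it iterates once over the 27 fixed letterMap.items() and adds value * msg.count(ch) per entry inside the same try/except, so the string-valued 'z' entry raises a swallowed TypeError and contributes 0 exactly as in A.
import Mathlib
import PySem

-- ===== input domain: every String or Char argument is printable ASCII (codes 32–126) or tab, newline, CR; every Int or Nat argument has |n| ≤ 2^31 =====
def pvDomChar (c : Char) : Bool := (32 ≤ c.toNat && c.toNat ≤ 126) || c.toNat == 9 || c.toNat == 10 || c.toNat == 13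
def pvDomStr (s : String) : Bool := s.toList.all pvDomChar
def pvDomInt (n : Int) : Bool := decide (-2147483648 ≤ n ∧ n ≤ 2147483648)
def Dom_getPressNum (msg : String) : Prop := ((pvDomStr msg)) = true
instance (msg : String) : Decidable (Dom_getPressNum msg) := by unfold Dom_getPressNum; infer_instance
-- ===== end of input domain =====

-- B iterates over the fixed keypad table and adds value * (occurrences of that key in msg),
-- instead of A's per-character walk over the message (alternative decomposition, same results).

-- letterMap[c] as Option Int. 'none' covers both a KeyError (char not a key) and the 'z'
-- entry, whose Python value is the STRING '4': 'total += ...' on it raises TypeError, which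
-- the bare 'except: continue' in A (and the 'except TypeError' in B) swallows, so those
-- characters contribute 0 in both programs.
def letterMap? (c : Char) : Option Int :=
  if c = 'a' then some 1 else
  if c = 'b' then some 2 else
  if c = 'c' then some 3 else
  if c = 'd' then some 1 else
  if c = 'e' then some 2 else
  if c = 'f' then some 3 else
  if c = 'g' then some 1 else
  if c = 'h' then some 2 else
  if c = 'i' then some 3 else
  if c = 'j' then some 1 else
  if c = 'k' then some 2 else
  if c = 'l' then some 3 else
  if c = 'm' then some 1 else
  if c = 'n' then some 2 else
  if c = 'o' then some 3 else
  if c = 'p' then some 1 else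
  if c = 'q' then some 2 else
  if c = 'r' then some 3 else
  if c = 's' then some 4 else
  if c = 't' then some 1 else
  if c = 'u' then some 2 else
  if c = 'v' then some 3 else
  if c = 'w' then some 1 else
  if c = 'x' then some 2 else
  if c = 'y' then some 3 else
  if c = ' ' then some 1 else
  none

-- ===== PORT A =====
-- total = 0; for letter in msg: try: total += letterMap[letter] except: continue
def getPressNum (msg : String) : Int :=
  msg.toList.foldl (fun total letter =>
    match letterMap? letter with
    | some v => total + v
    | none => total) 0

-- ===== PORT B =====
-- letterMap.items() in insertion order; ('z', none) is the string-valued entry (see above).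
def letterPairs : List (Char × Option Int) :=
  [('a', some 1), ('b', some 2), ('c', some 3), ('d', some 1), ('e', some 2), ('f', some 3), ('g', some 1), ('h', some 2), ('i', some 3), ('j', some 1), ('k', some 2), ('l', some 3), ('m', some 1), ('n', some 2), ('o', some 3), ('p', some 1), ('q', some 2), ('r', some 3), ('s', some 4), ('t', some 1), ('u', some 2), ('v', some 3), ('w', some 1), ('x', some 2), ('y', some 3), ('z', none), (' ', some 1)]

-- total = 0; for ch, v in letterMap.items(): try: total += v * msg.count(ch) except TypeError: continue
-- msg.count(ch) for a single character ch is exactly the character count (List.count).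
def getPressNum_alt (msg : String) : Int :=
  letterPairs.foldl (fun total p =>
    match p.2 with
    | some v => total + v * (msg.toList.count p.1 : Int)
    | none => total) 0

-- ===== PRECONDITION & SPEC =====
def Spec_getPressNum (msg : String) (out : Int) : Prop := out = getPressNum_alt msg
instance (msg : String) (out : Int) : Decidable (Spec_getPressNum msg out) := by unfold Spec_getPressNum; infer_instance

-- ===== CLAIM (what is proved, stated in full; the proofs are below) =====
def Claim_equal_getPressNum : Prop := ∀ (msg : String), Dom_getPressNum msg → Spec_getPressNum msg (getPressNum msg)

-- ===== LEMMAS AND PROOFS =====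

-- per-character contribution in A (0 when the try body raises)
def pvContrib (c : Char) : Int := match letterMap? c with | some v => v | none => 0

-- per-table-row contribution in B, for message l
def pvRowCount (l : List Char) (p : Char × Option Int) : Int :=
  match p.2 with | some v => v * (l.count p.1 : Int) | none => 0

-- per-table-row contribution of one extra message character c
def pvRowHit (c : Char) (p : Char × Option Int) : Int :=
  match p.2 with | some v => if p.1 = c then v else 0 | none => 0

theorem pvA_eq_sum (l : List Char) :
    l.foldl (fun total letter => match letterMap? letter with
      | some v => total + v
      | none => total) 0 = (l.map pvContrib).sum := by
  have h : (fun (total : Int) (letter : Char) => match letterMap? letter with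
      | some v => total + v
      | none => total) = fun total letter => total + pvContrib letter := by
    funext t c
    unfold pvContrib
    cases letterMap? c <;> simp
  rw [h, PySem.List.foldl_add]
  simp

theorem pvB_eq_sum (msg : String) :
    getPressNum_alt msg = (letterPairs.map (pvRowCount msg.toList)).sum := by
  unfold getPressNum_alt
  have h : (fun (total : Int) (p : Char × Option Int) => match p.2 with
      | some v => total + v * (msg.toList.count p.1 : Int)
      | none => total) = fun total p => total + pvRowCount msg.toList p := by
    funext t p
    unfold pvRowCount
    cases p.2 <;> simp
  rw [h, PySem.List.foldl_add]
  simp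

theorem pvRow_cons (c : Char) (t : List Char) (p : Char × Option Int) :
    pvRowCount (c :: t) p = pvRowCount t p + pvRowHit c p := by
  rcases p with ⟨k, ov⟩
  cases ov with
  | none => simp [pvRowCount, pvRowHit]
  | some v =>
    by_cases h : k = c
    · simp [pvRowCount, pvRowHit, h]; ring
    · simp [pvRowCount, pvRowHit, List.count_cons, h]
      exact Or.inl (fun he => h he.symm)

-- one extra message character c adds exactly A's per-character contribution to B's table sum
theorem pvHit_sum (c : Char) :
    (letterPairs.map (pvRowHit c)).sum = pvContrib c := by
  by_cases h1 : c = 'a'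
  · subst h1; decide
  by_cases h2 : c = 'b'
  · subst h2; decide
  by_cases h3 : c = 'c'
  · subst h3; decide
  by_cases h4 : c = 'd'
  · subst h4; decide
  by_cases h5 : c = 'e'
  · subst h5; decide
  by_cases h6 : c = 'f'
  · subst h6; decide
  by_cases h7 : c = 'g'
  · subst h7; decide
  by_cases h8 : c = 'h'
  · subst h8; decide
  by_cases h9 : c = 'i'
  · subst h9; decide
  by_cases h10 : c = 'j'
  · subst h10; decide
  by_cases h11 : c = 'k'
  · subst h11; decide
  by_cases h12 : c = 'l'
  · subst h12; decide
  by_cases h13 : c = 'm'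
  · subst h13; decide
  by_cases h14 : c = 'n'
  · subst h14; decide
  by_cases h15 : c = 'o'
  · subst h15; decide
  by_cases h16 : c = 'p'
  · subst h16; decide
  by_cases h17 : c = 'q'
  · subst h17; decide
  by_cases h18 : c = 'r'
  · subst h18; decide
  by_cases h19 : c = 's'
  · subst h19; decide
  by_cases h20 : c = 't'
  · subst h20; decide
  by_cases h21 : c = 'u'
  · subst h21; decide
  by_cases h22 : c = 'v'
  · subst h22; decide
  by_cases h23 : c = 'w'
  · subst h23; decide
  by_cases h24 : c = 'x'
  · subst h24; decide
  by_cases h25 : c = 'y'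
  · subst h25; decide
  by_cases h26 : c = 'z'
  · subst h26; decide
  by_cases h27 : c = ' '
  · subst h27; decide
  simp [letterPairs, pvRowHit, pvContrib, letterMap?, h1, h2, h3, h4, h5, h6, h7, h8, h9, h10, h11, h12, h13, h14, h15, h16, h17, h18, h19, h20, h21, h22, h23, h24, h25, h27, Ne.symm h1, Ne.symm h2, Ne.symm h3, Ne.symm h4, Ne.symm h5, Ne.symm h6, Ne.symm h7, Ne.symm h8, Ne.symm h9, Ne.symm h10, Ne.symm h11, Ne.symm h12, Ne.symm h13, Ne.symm h14, Ne.symm h15, Ne.symm h16, Ne.symm h17, Ne.symm h18, Ne.symm h19, Ne.symm h20, Ne.symm h21, Ne.symm h22, Ne.symm h23, Ne.symm h24, Ne.symm h25, Ne.symm h27]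

theorem pvB_sum_eq (l : List Char) :
    (letterPairs.map (pvRowCount l)).sum = (l.map pvContrib).sum := by
  induction l with
  | nil => decide
  | cons c t ih =>
    have hp : pvRowCount (c :: t) = fun p => pvRowCount t p + pvRowHit c p :=
      funext (pvRow_cons c t)
    rw [hp, PySem.List.sum_map_add_int, ih, pvHit_sum]
    simp [add_comm]

-- ===== VERDICT (by name: the statement is the Claim_ definition above) =====
theorem getPressNum_spec : Claim_equal_getPressNum := by
  intro msg _
  unfold Spec_getPressNum getPressNum
  rw [pvA_eq_sum, pvB_eq_sum, pvB_sum_eq]
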